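-- pv_equiv track=rewrite | github.com/delk73/precision-signal | scripts/artifact_diff.py | reconvergence_summary
-- ===== SOURCE A (Python) =====
-- TRANSIENT_WINDOW_FRAMES = 8
--
-- def reconvergence_summary(sample_diffs: list[int], start_idx: int) -> str | None:
--     transient_window_end = min(len(sample_diffs) - 1, TRANSIENT_WINDOW_FRAMES)
--     for rel_idx in range(1, transient_window_end + 1):
--         if sample_diffs[rel_idx] != 0:
--             continue
--         if all(sample_diffs[j] == 0 for j in range(rel_idx, transient_window_end + 1)):
--             return f"reconverged_at_frame={start_idx + rel_idx}"
--     return None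
-- ===== SOURCE B (Python) =====
-- TRANSIENT_WINDOW_FRAMES = 8
--
-- def reconvergence_summary(sample_diffs: list[int], start_idx: int) -> str | None:
--     # One linear pass: track the last nonzero frame in the window; the
--     # reconvergence point is the frame right after it (closed form).
--     window_end = min(len(sample_diffs) - 1, TRANSIENT_WINDOW_FRAMES)
--     last_nonzero = 0
--     for rel in range(1, window_end + 1):
--         if sample_diffs[rel] != 0:
--             last_nonzero = rel
--     reconv = last_nonzero + 1
--     if reconv <= window_end:
--         return f"reconverged_at_frame={start_idx + reconv}"
--     return None
-- ===== Notes on version B (the rewrite author's own statement) =====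
-- stated objective: simpler
-- what changed: Replaces A's scan with a quadratic inner all() suffix-check by a single linear pass that tracks the last nonzero frame in the window and derives the reconvergence frame as last_nonzero+1 in closed form.
import Mathlib
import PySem

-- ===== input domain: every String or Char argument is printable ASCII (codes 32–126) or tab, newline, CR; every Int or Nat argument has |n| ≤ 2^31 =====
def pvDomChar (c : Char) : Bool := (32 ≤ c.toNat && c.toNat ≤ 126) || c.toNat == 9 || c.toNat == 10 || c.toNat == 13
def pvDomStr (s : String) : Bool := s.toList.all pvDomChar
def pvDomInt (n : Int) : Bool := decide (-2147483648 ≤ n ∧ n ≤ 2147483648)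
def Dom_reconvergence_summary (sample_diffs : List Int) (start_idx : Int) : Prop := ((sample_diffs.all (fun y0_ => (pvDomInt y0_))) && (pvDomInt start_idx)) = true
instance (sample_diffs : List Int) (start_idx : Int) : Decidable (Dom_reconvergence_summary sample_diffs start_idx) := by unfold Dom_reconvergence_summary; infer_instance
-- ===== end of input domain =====

-- B replaces A's nested suffix scan by one linear pass tracking the last nonzero
-- frame, then computes the reconvergence frame in closed form (objective: simpler).

-- ===== PORT A =====
-- the for-loop of A with its early return; the inner all() is the Bool `all` over
-- the recomputed range, exactly as in the Python. Indices 1..e are always in range,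
-- so pyGetD with default 0 is exact here.
def reconvLoopA (xs : List Int) (e si : Int) : List Int → Option String
  | [] => none
  | rel :: rest =>
    if PySem.List.pyGetD xs rel 0 ≠ 0 then reconvLoopA xs e si rest
    else if (PySem.List.pyRange rel (e+1) 1).all (fun j => PySem.List.pyGetD xs j 0 == 0)
    then some ("reconverged_at_frame=" ++ PySem.Int.toStr (si + rel))
    else reconvLoopA xs e si rest

def reconvergence_summary (sample_diffs : List Int) (start_idx : Int) : Option String :=
  let e : Int := min (PySem.List.len sample_diffs - 1) 8
  reconvLoopA sample_diffs e start_idx (PySem.List.pyRange 1 (e+1) 1)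

-- ===== PORT B =====
def reconvergence_summary_alt (sample_diffs : List Int) (start_idx : Int) : Option String :=
  let e : Int := min (PySem.List.len sample_diffs - 1) 8
  let last_nonzero : Int :=
    (PySem.List.pyRange 1 (e+1) 1).foldl
      (fun acc rel => if PySem.List.pyGetD sample_diffs rel 0 ≠ 0 then rel else acc) 0
  let reconv := last_nonzero + 1
  if reconv ≤ e then some ("reconverged_at_frame=" ++ PySem.Int.toStr (start_idx + reconv))
  else none

-- ===== PRECONDITION & SPEC =====
def Spec_reconvergence_summary (sample_diffs : List Int) (start_idx : Int) (out : Option String) : Prop := out = reconvergence_summary_alt sample_diffs start_idx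
instance (sample_diffs : List Int) (start_idx : Int) (out : Option String) : Decidable (Spec_reconvergence_summary sample_diffs start_idx out) := by unfold Spec_reconvergence_summary; infer_instance

-- ===== CLAIM (what is proved, stated in full; the proofs are below) =====
def Claim_equal_reconvergence_summary : Prop := ∀ (sample_diffs : List Int) (start_idx : Int), Dom_reconvergence_summary sample_diffs start_idx → Spec_reconvergence_summary sample_diffs start_idx (reconvergence_summary sample_diffs start_idx)

-- ===== LEMMAS AND PROOFS =====

-- true on frames with a nonzero diff
def nzB (xs : List Int) (j : Int) : Bool := decide (PySem.List.pyGetD xs j 0 ≠ 0)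

-- length of the shortest prefix containing every `true` (= 1 + index of last true, 0 if none)
def upTo : List Bool → Nat
  | [] => 0
  | b :: rest => if upTo rest = 0 then (if b then 1 else 0) else upTo rest + 1

lemma upTo_zero_iff (bs : List Bool) : upTo bs = 0 ↔ bs.all (fun b => !b) = true := by
  induction bs with
  | nil => simp [upTo]
  | cons b rest ih =>
    by_cases hr : upTo rest = 0 <;> cases b <;> simp [upTo, hr, ← ih]

lemma step_shift (si rel : Int) (u' len' : Nat) :
    (if u' < len' then some ("reconverged_at_frame=" ++ PySem.Int.toStr (si + (rel+1) + (u' : Int))) else none)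
    = (if u' + 1 < len' + 1 then some ("reconverged_at_frame=" ++ PySem.Int.toStr (si + rel + ((u' + 1 : Nat) : Int))) else (none : Option String)) := by
  have harg : si + (rel+1) + (u' : Int) = si + rel + ((u' + 1 : Nat) : Int) := by push_cast; ring
  rw [harg]
  simp

lemma loopA_eq (xs : List Int) (e si : Int) : ∀ (n : Nat) (rel : Int), e + 1 - rel ≤ (n : Int) →
    reconvLoopA xs e si (PySem.List.pyRange rel (e+1) 1) =
      (if upTo ((PySem.List.pyRange rel (e+1) 1).map (nzB xs)) < (PySem.List.pyRange rel (e+1) 1).length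
       then some ("reconverged_at_frame=" ++ PySem.Int.toStr (si + rel + (upTo ((PySem.List.pyRange rel (e+1) 1).map (nzB xs)) : Int)))
       else none) := by
  intro n
  induction n with
  | zero =>
    intro rel h
    rw [PySem.List.pyRange_one_eq_nil (by omega)]
    simp [reconvLoopA, upTo]
  | succ n ih =>
    intro rel h
    by_cases hlt : rel < e + 1
    · have hc : PySem.List.pyRange rel (e+1) 1 = rel :: PySem.List.pyRange (rel+1) (e+1) 1 :=
        PySem.List.pyRange_one_cons hlt
      have ihr := ih (rel+1) (by omega)
      rw [hc]
      simp only [reconvLoopA, hc, List.map_cons, List.length_cons]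
      by_cases hz : PySem.List.pyGetD xs rel 0 = 0
      · have hnz : nzB xs rel = false := by simp [nzB, hz]
        rw [if_neg (by simpa using hz)]
        by_cases hall : ((rel :: PySem.List.pyRange (rel+1) (e+1) 1).all
            (fun j => PySem.List.pyGetD xs j 0 == 0)) = true
        · have h0 : upTo ((rel :: PySem.List.pyRange (rel+1) (e+1) 1).map (nzB xs)) = 0 := by
            rw [upTo_zero_iff]
            simp only [List.all_map, List.all_eq_true] at hall ⊢
            intro j hj
            simpa [nzB] using hall j hj
          simp only [List.map_cons] at h0
          rw [if_pos hall, h0, if_pos (by omega)]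
          norm_num
        · have hu' : upTo ((PySem.List.pyRange (rel+1) (e+1) 1).map (nzB xs)) ≠ 0 := by
            intro h0
            apply hall
            rw [upTo_zero_iff] at h0
            simp only [List.all_map, List.all_eq_true] at h0 ⊢
            intro j hj
            rcases List.mem_cons.mp hj with rfl | hj'
            · simp [hz]
            · have := h0 j hj'
              simpa [nzB] using this
          rw [if_neg hall, ihr, upTo, if_neg hu']
          exact step_shift si rel _ _
      · have hnz : nzB xs rel = true := by simp [nzB, hz]
        rw [if_pos hz, ihr, upTo]
        have hK : (if upTo ((PySem.List.pyRange (rel+1) (e+1) 1).map (nzB xs)) = 0 then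
              (if nzB xs rel then (1:Nat) else 0)
            else upTo ((PySem.List.pyRange (rel+1) (e+1) 1).map (nzB xs)) + 1)
            = upTo ((PySem.List.pyRange (rel+1) (e+1) 1).map (nzB xs)) + 1 := by
          rw [if_pos hnz]
          by_cases h0 : upTo ((PySem.List.pyRange (rel+1) (e+1) 1).map (nzB xs)) = 0 <;> simp [h0]
        rw [hK]
        exact step_shift si rel _ _
    · rw [PySem.List.pyRange_one_eq_nil (by omega)]
      simp [reconvLoopA, upTo]

lemma foldB_eq (xs : List Int) (e : Int) : ∀ (n : Nat) (rel acc : Int), e + 1 - rel ≤ (n : Int) →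
    (PySem.List.pyRange rel (e+1) 1).foldl
        (fun acc r => if PySem.List.pyGetD xs r 0 ≠ 0 then r else acc) acc =
      (if upTo ((PySem.List.pyRange rel (e+1) 1).map (nzB xs)) = 0 then acc
       else rel + (upTo ((PySem.List.pyRange rel (e+1) 1).map (nzB xs)) : Int) - 1) := by
  intro n
  induction n with
  | zero =>
    intro rel acc h
    rw [PySem.List.pyRange_one_eq_nil (by omega)]
    simp [upTo]
  | succ n ih =>
    intro rel acc h
    by_cases hlt : rel < e + 1
    · have hc : PySem.List.pyRange rel (e+1) 1 = rel :: PySem.List.pyRange (rel+1) (e+1) 1 :=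
        PySem.List.pyRange_one_cons hlt
      rw [hc]
      simp only [List.foldl_cons, List.map_cons]
      rw [ih (rel+1) _ (by omega), upTo]
      by_cases hz : PySem.List.pyGetD xs rel 0 = 0
      · have hnz : nzB xs rel = false := by simp [nzB, hz]
        simp only [hz, ne_eq, not_true_eq_false, if_false, hnz]
        by_cases hu : upTo ((PySem.List.pyRange (rel+1) (e+1) 1).map (nzB xs)) = 0
        · simp [hu]
        · rw [if_neg hu, if_neg hu, if_neg (by simpa [hu])]
          push_cast
          have : (upTo ((PySem.List.pyRange (rel+1) (e+1) 1).map (nzB xs)) : Int) ≥ 1 := by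
            omega
          omega
      · have hnz : nzB xs rel = true := by simp [nzB, hz]
        simp only [hz, ne_eq, not_false_eq_true, if_true, hnz]
        by_cases hu : upTo ((PySem.List.pyRange (rel+1) (e+1) 1).map (nzB xs)) = 0
        · simp [hu]
        · rw [if_neg hu, if_neg (by simp [hu]), if_neg (by simpa [hu])]
          push_cast
          omega
    · rw [PySem.List.pyRange_one_eq_nil (by omega)]
      simp [upTo]

-- ===== VERDICT (by name: the statement is the Claim_ definition above) =====
theorem reconvergence_summary_spec : Claim_equal_reconvergence_summary := by
  intro xs si _
  unfold Spec_reconvergence_summary reconvergence_summary reconvergence_summary_alt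
  have he8 : min (PySem.List.len xs - 1) 8 ≤ 8 := min_le_right _ _
  set e := min (PySem.List.len xs - 1) 8 with he
  simp only []
  rw [loopA_eq xs e si 9 1 (by omega), foldB_eq xs e 9 1 0 (by omega)]
  have hlen : (PySem.List.pyRange 1 (e+1) 1).length = e.toNat := by
    rw [PySem.List.length_pyRange_one]
    congr 1
    omega
  rw [hlen]
  set u := upTo ((PySem.List.pyRange 1 (e+1) 1).map (nzB xs)) with hu
  by_cases h0 : u = 0
  · rw [if_pos h0]
    by_cases hc : u < e.toNat
    · rw [if_pos hc, if_pos (by omega)]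
      have : si + 1 + (u : Int) = si + (0 + 1) := by omega
      rw [this]
    · rw [if_neg hc, if_neg (by omega)]
  · rw [if_neg h0]
    have hu1 : (1 : Int) ≤ (u : Int) := by omega
    by_cases hc : u < e.toNat
    · rw [if_pos hc, if_pos (by omega)]
      have : si + 1 + (u : Int) = si + (1 + (u : Int) - 1 + 1) := by omega
      rw [this]
    · rw [if_neg hc, if_neg (by omega)]
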